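-- pv_equiv track=rewrite | github.com/ravish-oo/opoch-toe-arc-agi | src/sviews.py | minimal_row_period
-- ===== SOURCE A (Python) =====
-- from typing import List, Tuple, Dict, Callable, Optional, Any
--
-- IntGrid = List[List[int]]
--
-- def minimal_row_period(G: IntGrid) -> Tuple[int, List[int]]:
--     """
--     Compute minimal period per row and their gcd.
--
--     Args:
--         G: Grid to analyze
--
--     Returns:
--         (gcd_row, per_row_periods)
--         where gcd_row is gcd of all row periods,
--         and per_row_periods[i] is minimal period of row i
--
--     Algorithm:
--         For each row i:
--             - Check divisors of W in ascending order
--             - Find smallest p where G[i,j] = G[i,(j+p)%W] for all j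
--         Return gcd of all row periods
--     """
--     H = len(G)
--     W = len(G[0]) if H > 0 else 0
--
--     if W == 0:
--         return (1, [])
--
--     # Compute divisors of W
--     divisors = []
--     for p in range(1, W + 1):
--         if W % p == 0:
--             divisors.append(p)
--
--     per_row_periods = []
--
--     for i in range(H):
--         row_period = W  # Default: full width
--
--         for p in divisors:
--             # Check if period p works for this row
--             is_period = True
--             for j in range(W):
--                 j_shifted = (j + p) % W
--                 if G[i][j] != G[i][j_shifted]:
--                     is_period = False
--                     break
--
--             if is_period:
--                 row_period = p
--                 break  # Found minimal period
--
--         per_row_periods.append(row_period)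
--
--     # Compute gcd of all row periods
--     import math
--     gcd_row = per_row_periods[0] if per_row_periods else 1
--     for p in per_row_periods[1:]:
--         gcd_row = math.gcd(gcd_row, p)
--
--     return (gcd_row, per_row_periods)
-- ===== SOURCE B (Python) =====
-- from math import gcd
--
-- def minimal_row_period(G):
--     H = len(G)
--     W = len(G[0]) if H else 0
--     if W == 0:
--         return (1, [])
--     periods = []
--     for row in G:
--         r = row[:W]
--         p = next((q for q in range(1, W + 1) if r[q:] + r[:q] == r), W)
--         periods.append(p)
--     g = 0
--     for p in periods:
--         g = gcd(g, p)
--     return (g, periods)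
-- ===== Notes on version B (the rewrite author's own statement) =====
-- stated objective: alternative
-- what changed: B finds each row's period as the least cyclic shift p with r[p:]+r[:p]==r scanned from p=1 (the least rotation period automatically divides W), instead of A's enumeration of the divisors of W with an index-wise (j+p)%W comparison; the gcd is folded from 0 over the whole list instead of seeding with the head.
import Mathlib
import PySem

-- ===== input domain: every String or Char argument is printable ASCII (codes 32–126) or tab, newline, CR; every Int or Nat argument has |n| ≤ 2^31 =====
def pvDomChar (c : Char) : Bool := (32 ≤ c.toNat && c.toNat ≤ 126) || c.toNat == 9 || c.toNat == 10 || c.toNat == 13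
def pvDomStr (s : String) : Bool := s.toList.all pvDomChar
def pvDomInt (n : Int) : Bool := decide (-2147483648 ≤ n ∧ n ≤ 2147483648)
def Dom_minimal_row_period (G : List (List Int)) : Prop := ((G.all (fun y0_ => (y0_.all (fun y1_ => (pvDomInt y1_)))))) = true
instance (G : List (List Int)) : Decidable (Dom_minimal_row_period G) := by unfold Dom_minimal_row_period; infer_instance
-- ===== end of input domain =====

-- B replaces A's divisor enumeration with a scan of cyclic shifts (the least shift with
-- r[p:]+r[:p]==r automatically divides the width); alternative algorithm, no speed claim.

-- ===== PORT A =====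
-- G[i][j]: Python raises IndexError out of range; Pre_ keeps all accesses in range, so getD's
-- default 0 is unreachable on admitted inputs.  All index values are nonnegative, so Nat
-- arithmetic matches Python's int arithmetic here ((j+p) % W with W > 0).
def pvIdxA (row : List Int) (j : Nat) : Int := row.getD j 0

-- inner 'for j in range(W)' loop with its break-on-mismatch (is_period)
def pvCheckA (row : List Int) (W p : Nat) : Bool :=
  (List.range W).all (fun j => pvIdxA row j == pvIdxA row ((j + p) % W))

def minimal_row_period (G : List (List Int)) : Int × List Int :=
  let H := G.length
  let W := if 0 < H then (G.headD []).length else 0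
  if W = 0 then (1, [])
  else
    -- divisors of W collected in ascending order (range(1, W+1) = List.range' 1 W)
    let divisors := (List.range' 1 W).filter (fun p => W % p == 0)
    -- 'for i in range(H): ... G[i]' traverses the rows in order
    let perRow : List Nat := G.map (fun row =>
      match divisors.find? (fun p => pvCheckA row W p) with
      | some p => p
      | none => W)   -- row_period default: full width
    let g := (perRow.drop 1).foldl Nat.gcd (perRow.headD 1)
    ((g : Int), perRow.map (fun p => (p : Int)))

-- ===== PORT B =====
-- r[q:] + r[:q] == r  (q ≥ 0, so drop/take are exactly Python's slices)
def pvShiftEq (r : List Int) (q : Nat) : Bool := (r.drop q ++ r.take q) == r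

def minimal_row_period_alt (G : List (List Int)) : Int × List Int :=
  let W := if G.length ≠ 0 then (G.headD []).length else 0
  if W = 0 then (1, [])
  else
    let periods : List Nat := G.map (fun row =>
      ((List.range' 1 W).find? (fun q => pvShiftEq (row.take W) q)).getD W)
    let g := periods.foldl Nat.gcd 0
    ((g : Int), periods.map (fun p => (p : Int)))

-- ===== PRECONDITION & SPEC =====
-- Pre_ excludes exactly the grids on which A raises IndexError: those with a row shorter than
-- the first row (A indexes every row up to the first row's width).
def Pre_minimal_row_period (G : List (List Int)) : Prop :=
  ∀ row ∈ G, (G.headD []).length ≤ row.length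
instance (G : List (List Int)) : Decidable (Pre_minimal_row_period G) := by
  unfold Pre_minimal_row_period; infer_instance

def pvWitness_minimal_row_period : List (List Int) := [[1, 2, 1, 2], [3, 3, 3, 3]]

def Spec_minimal_row_period (G : List (List Int)) (out : Int × List Int) : Prop := out = minimal_row_period_alt G
instance (G : List (List Int)) (out : Int × List Int) : Decidable (Spec_minimal_row_period G out) := by unfold Spec_minimal_row_period; infer_instance

-- ===== CLAIM (what is proved, stated in full; the proofs are below) =====
def Claim_equal_minimal_row_period : Prop := ∀ (G : List (List Int)), Dom_minimal_row_period G → Pre_minimal_row_period G → Spec_minimal_row_period G (minimal_row_period G)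

-- ===== LEMMAS AND PROOFS =====

-- find? over a filtered list = find? of the conjunction
theorem pv_find?_filter (l : List Nat) (f p : Nat → Bool) :
    (l.filter f).find? p = l.find? (fun a => f a && p a) := by
  induction l with
  | nil => rfl
  | cons a l ih =>
    by_cases hf : f a = true <;> by_cases hp : p a = true <;>
      simp [hf, hp, ih]

-- find? on an ascending range returns the least element satisfying the predicate
theorem pv_find?_range' (P : Nat → Bool) :
    ∀ (n a q : Nat), a ≤ q → q < a + n → P q = true →
      (∀ x, a ≤ x → x < q → P x = false) → (List.range' a n).find? P = some q := by
  intro n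
  induction n with
  | zero => intro a q h1 h2 _ _; omega
  | succ n ih =>
    intro a q h1 h2 hq hmin
    rw [List.range'_succ]
    by_cases hqa : q = a
    · subst hqa; simp [List.find?_cons_of_pos, hq]
    · have hPa : P a = false := hmin a le_rfl (by omega)
      rw [List.find?_cons_of_neg (by simp [hPa])]
      exact ih (a + 1) q (by omega) (by omega) hq (fun x hx1 hx2 => hmin x (by omega) hx2)

-- getD form of List.getElem_rotate
theorem pv_rotate_getD (l : List Int) (n j : Nat) (hj : j < l.length) :
    (l.rotate n).getD j 0 = l.getD ((j + n) % l.length) 0 := by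
  have h1 : j < (l.rotate n).length := by simpa using hj
  have h2 : (j + n) % l.length < l.length := Nat.mod_lt _ (by omega)
  rw [List.getD_eq_getElem _ 0 h1, List.getD_eq_getElem _ 0 h2]
  exact List.getElem_rotate l n j h1

-- extensionality via getD
theorem pv_ext_getD (l1 l2 : List Int) (hlen : l1.length = l2.length)
    (h : ∀ j, j < l1.length → l1.getD j 0 = l2.getD j 0) : l1 = l2 := by
  apply List.ext_getElem hlen
  intro i h1 h2
  have hi := h i h1
  rwa [List.getD_eq_getElem _ 0 h1, List.getD_eq_getElem _ 0 h2] at hi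

-- the per-row computation of A equals that of B
theorem pv_row_eq (row : List Int) (W : Nat) (hW : 0 < W) (hlen : W ≤ row.length) :
    (match ((List.range' 1 W).filter (fun p => W % p == 0)).find? (fun p => pvCheckA row W p) with
     | some p => p
     | none => W)
    = ((List.range' 1 W).find? (fun q => pvShiftEq (row.take W) q)).getD W := by
  set r := row.take W with hrdef
  have hr : r.length = W := by simp [hrdef, Nat.min_eq_left hlen]
  -- getD bridge between the truncated row and the row itself
  have hget : ∀ i, i < W → r.getD i 0 = row.getD i 0 := by
    intro i hi
    have hi' : i < row.length := lt_of_lt_of_le hi hlen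
    rw [List.getD_eq_getElem r 0 (by omega), List.getD_eq_getElem row 0 hi']
    simp [hrdef]
  -- r[q:]+r[:q] == r is exactly 'rotate q fixes r'
  have hshift : ∀ q, q ≤ W → (pvShiftEq r q = true ↔ r.rotate q = r) := by
    intro q hq
    unfold pvShiftEq
    rw [List.rotate_eq_drop_append_take (by omega)]
    exact beq_iff_eq
  have hQW : pvShiftEq r W = true :=
    (hshift W le_rfl).mpr (by rw [← hr]; exact List.rotate_length r)
  -- 'rotate p fixes r' as a pointwise statement
  have hrot_iff : ∀ p, r.rotate p = r ↔ ∀ j, j < W → r.getD ((j + p) % W) 0 = r.getD j 0 := by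
    intro p
    constructor
    · intro h j hj
      have h2 : (r.rotate p).getD j 0 = r.getD j 0 := by rw [h]
      rw [pv_rotate_getD r p j (by omega), hr] at h2
      exact h2
    · intro h
      apply pv_ext_getD _ _ (by simp)
      intro j hj
      have hjr : j < r.length := by simpa using hj
      rw [pv_rotate_getD r p j hjr, hr]
      exact h j (by omega)
  -- A's inner check is the same 'rotate p fixes r'
  have hcheck : ∀ p, pvCheckA row W p = true ↔ r.rotate p = r := by
    intro p
    simp only [pvCheckA, pvIdxA, List.all_eq_true, List.mem_range, beq_iff_eq]
    rw [hrot_iff p]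
    constructor
    · intro h j hj
      rw [hget _ (Nat.mod_lt _ hW), hget _ hj]
      exact (h j hj).symm
    · intro h j hj
      rw [← hget _ (Nat.mod_lt _ hW), ← hget _ hj]
      exact (h j hj).symm
  -- the least positive shift fixing r
  have hex : ∃ q, 0 < q ∧ pvShiftEq r q = true := ⟨W, hW, hQW⟩
  set q0 := Nat.find hex with hq0def
  obtain ⟨hq0pos, hq0Q⟩ := Nat.find_spec hex
  have hq0le : q0 ≤ W := Nat.find_min' hex ⟨hW, hQW⟩
  have hq0rot : r.rotate q0 = r := (hshift q0 hq0le).mp hq0Q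
  have hmin : ∀ x, 0 < x → x < q0 → pvShiftEq r x = false := by
    intro x hx hlt
    exact Bool.eq_false_iff.mpr (fun ht => Nat.find_min hex hlt ⟨hx, ht⟩)
  -- the least positive shift divides W (rotations compose additively)
  have hmul : ∀ k, r.rotate (q0 * k) = r := by
    intro k
    induction k with
    | zero => simp
    | succ k ih =>
      have hk : q0 * (k + 1) = q0 * k + q0 := by ring
      rw [hk, ← List.rotate_rotate, ih, hq0rot]
  have hdvd : q0 ∣ W := by
    rcases Nat.eq_zero_or_pos (W % q0) with h0 | hpos
    · exact Nat.dvd_of_mod_eq_zero h0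
    · exfalso
      have hWrot : r.rotate (W % q0) = r := by
        have h1 : r.rotate W = r := by rw [← hr]; exact List.rotate_length r
        have h2 : q0 * (W / q0) + W % q0 = W := Nat.div_add_mod W q0
        calc r.rotate (W % q0) = (r.rotate (q0 * (W / q0))).rotate (W % q0) := by rw [hmul]
          _ = r.rotate (q0 * (W / q0) + W % q0) := List.rotate_rotate r _ _
          _ = r.rotate W := by rw [h2]
          _ = r := h1
      have hlt : W % q0 < q0 := Nat.mod_lt _ hq0pos
      have ht : pvShiftEq r (W % q0) = true := (hshift _ (by omega)).mpr hWrot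
      rw [hmin _ hpos hlt] at ht
      exact Bool.false_ne_true ht
  -- B's scan returns q0
  have hB : (List.range' 1 W).find? (fun q => pvShiftEq r q) = some q0 :=
    pv_find?_range' _ W 1 q0 hq0pos (by omega) hq0Q (fun x hx1 hx2 => hmin x (by omega) hx2)
  -- A's scan of the divisors also returns q0
  have hA : ((List.range' 1 W).filter (fun p => W % p == 0)).find?
      (fun p => pvCheckA row W p) = some q0 := by
    rw [pv_find?_filter]
    apply pv_find?_range' _ W 1 q0 hq0pos (by omega)
    · simp only [Bool.and_eq_true, beq_iff_eq]
      refine ⟨?_, (hcheck q0).mpr hq0rot⟩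
      obtain ⟨c, hc⟩ := hdvd
      simp [hc, Nat.mul_mod_right]
    · intro x hx1 hx2
      by_cases hc : pvCheckA row W x = true
      · have hrx : r.rotate x = r := (hcheck x).mp hc
        have : pvShiftEq r x = true := (hshift x (by omega)).mpr hrx
        rw [hmin x (by omega) hx2] at this
        exact absurd this (by simp)
      · simp [hc]
  rw [hA, hB]
  rfl

-- ===== VERDICT (by name: the statement is the Claim_ definition above) =====
theorem minimal_row_period_spec : Claim_equal_minimal_row_period := by
  intro G _ hPre
  unfold Spec_minimal_row_period minimal_row_period minimal_row_period_alt
  cases G with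
  | nil => rfl
  | cons r0 tl =>
    simp only [List.length_cons, List.headD_cons]
    by_cases hW : r0.length = 0
    · simp [hW]
    · have hWpos : 0 < r0.length := Nat.pos_of_ne_zero hW
      rw [if_pos (by omega : 0 < tl.length + 1), if_pos (by omega : tl.length + 1 ≠ 0),
        if_neg hW, if_neg hW]
      have hmap : ((r0 :: tl).map (fun row =>
          match ((List.range' 1 r0.length).filter (fun p => r0.length % p == 0)).find?
              (fun p => pvCheckA row r0.length p) with
          | some p => p
          | none => r0.length))
          = ((r0 :: tl).map (fun row =>
          ((List.range' 1 r0.length).find? (fun q => pvShiftEq (row.take r0.length) q)).getD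
            r0.length)) := by
        apply List.map_congr_left
        intro row hrow
        exact pv_row_eq row r0.length hWpos (by simpa using hPre row hrow)
      rw [hmap]
      simp only [List.map_cons, List.foldl_cons, Nat.gcd_zero_left, List.headD_cons,
        List.drop_succ_cons, List.drop_zero]
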